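-- pv_equiv track=rewrite | github.com/GlassToeStudio/AdventOfCode | Day_8/day_8_problem_2.py | format_pixel_data
-- ===== SOURCE A (Python) =====
-- def create_pixel_map(layer_data):
--     data_map = layer_data[0]
--     for layer in layer_data:
--         for i in range(0, len(layer)):
--             if data_map[i] == 2:
--                 data_map[i] = layer[i]
--     return data_map
--
-- def format_pixel_data(layer_data, width, height):
--     formatted_data = create_pixel_map(layer_data)
--     pixel_data = []
--     start = 0
--     end = width
--     for i in range(height):
--         pixel_data.append(formatted_data[start:end])
--         start = end
--         end += width
--     return pixel_data
-- ===== SOURCE B (Python) =====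
-- def format_pixel_data(layer_data, width, height):
--     # Keep the alias: mutates layer_data[0] in place, like the original.
--     result = layer_data[0]
--     for i in range(len(result)):
--         if result[i] == 2:
--             for layer in layer_data:
--                 if i < len(layer) and layer[i] != 2:
--                     result[i] = layer[i]
--                     break
--     return [result[i * width:(i + 1) * width] for i in range(height)]
-- ===== Notes on version B (the rewrite author's own statement) =====
-- stated objective: idiomatic
-- what changed: Replaced A's layer-major full sweep (every layer rewrites every still-2 pixel, no early exit) by a pixel-major scan that, for each pixel still equal to 2, finds the first non-transparent layer value and breaks, and builds the rows by a slice comprehension instead of a running start/end accumulator.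
import Mathlib
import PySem

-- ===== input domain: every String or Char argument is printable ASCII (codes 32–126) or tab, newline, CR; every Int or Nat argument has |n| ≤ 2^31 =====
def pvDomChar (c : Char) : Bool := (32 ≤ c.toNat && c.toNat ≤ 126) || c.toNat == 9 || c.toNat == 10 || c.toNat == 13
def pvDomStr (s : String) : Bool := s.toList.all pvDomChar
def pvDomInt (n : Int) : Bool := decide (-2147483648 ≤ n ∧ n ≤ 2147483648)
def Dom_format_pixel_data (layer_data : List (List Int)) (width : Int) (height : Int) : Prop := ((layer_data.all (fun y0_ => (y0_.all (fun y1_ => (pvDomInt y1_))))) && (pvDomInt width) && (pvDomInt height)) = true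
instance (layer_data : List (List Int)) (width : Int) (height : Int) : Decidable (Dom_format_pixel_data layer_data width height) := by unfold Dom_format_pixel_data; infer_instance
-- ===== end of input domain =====

-- B replaces A's layer-major full sweep by a pixel-major scan with an early break, and builds
-- the rows by a slice comprehension instead of a running start/end accumulator (objective:
-- idiomatic).  Both Pythons mutate layer_data[0] in place identically (B keeps the alias);
-- the equivalence proved here is about the return value.

-- ===== PORT A =====
-- create_pixel_map: layer-major sweep; data_map starts as layer_data[0]
def pvCreatePixelMap (layer_data : List (List Int)) : List Int :=
  layer_data.foldl
    (fun dm layer =>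
      (PySem.List.pyRange 0 (layer.length : Int) 1).foldl
        (fun dm i =>
          if PySem.List.pyGetD dm i 0 = 2 then dm.set i.toNat (PySem.List.pyGetD layer i 0) else dm)
        dm)
    (layer_data.headD [])

def format_pixel_data (layer_data : List (List Int)) (width : Int) (height : Int) : List (List Int) :=
  let formatted_data := pvCreatePixelMap layer_data
  (((PySem.List.pyRange 0 height 1).foldl
      (fun st _ =>
        (st.1 ++ [PySem.List.slice formatted_data (some st.2.1) (some st.2.2)], st.2.2, st.2.2 + width))
      (([] : List (List Int)), (0 : Int), width))).1

-- ===== PORT B =====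
-- the inner `for layer in layer_data: … break` loop of Source B: first layer with i in range and value ≠ 2
def pvFirstHit (layers : List (List Int)) (i : Nat) : Option Int :=
  match layers with
  | [] => none
  | l :: ls =>
    if h : i < l.length then (if l[i] ≠ 2 then some l[i] else pvFirstHit ls i)
    else pvFirstHit ls i

def format_pixel_data_alt (layer_data : List (List Int)) (width : Int) (height : Int) : List (List Int) :=
  let result0 := layer_data.headD []
  let result := (List.range result0.length).foldl
    (fun res (i : Nat) =>
      if PySem.List.pyGetD res (i : Int) 0 = 2 then
        match pvFirstHit layer_data i with
        | some v => res.set i v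
        | none => res
      else res)
    result0
  (PySem.List.pyRange 0 height 1).map
    (fun i => PySem.List.slice result (some (i * width)) (some ((i + 1) * width)))

-- ===== PRECONDITION & SPEC =====
-- Pre_ is exactly where A returns: a nonempty layer list whose layers are no longer than the
-- first layer (otherwise layer_data[0] or data_map[i] raises IndexError).
def Pre_format_pixel_data (layer_data : List (List Int)) (width : Int) (height : Int) : Prop :=
  layer_data ≠ [] ∧ ∀ l ∈ layer_data, l.length ≤ (layer_data.headD []).length
instance (layer_data : List (List Int)) (width : Int) (height : Int) : Decidable (Pre_format_pixel_data layer_data width height) := by unfold Pre_format_pixel_data; infer_instance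

def pvWitness_format_pixel_data : List (List Int) × Int × Int := ([[2, 0, 2, 1], [1, 1, 2, 0]], 2, 2)

def Spec_format_pixel_data (layer_data : List (List Int)) (width : Int) (height : Int) (out : List (List Int)) : Prop := out = format_pixel_data_alt layer_data width height
instance (layer_data : List (List Int)) (width : Int) (height : Int) (out : List (List Int)) : Decidable (Spec_format_pixel_data layer_data width height out) := by unfold Spec_format_pixel_data; infer_instance

-- ===== CLAIM (what is proved, stated in full; the proofs are below) =====
def Claim_equal_format_pixel_data : Prop := ∀ (layer_data : List (List Int)) (width : Int) (height : Int), Dom_format_pixel_data layer_data width height → Pre_format_pixel_data layer_data width height → Spec_format_pixel_data layer_data width height (format_pixel_data layer_data width height)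

-- ===== LEMMAS AND PROOFS =====

theorem pv_getD_set (l : List Int) (n j : Nat) (v d : Int) :
    (l.set n v).getD j d = if n = j ∧ n < l.length then v else l.getD j d := by
  simp [List.getD_eq_getElem?_getD, List.getElem?_set]
  split_ifs with h1 h2 h3 <;> simp_all <;> omega

theorem pv_getD_ext (l1 l2 : List Int) (hlen : l1.length = l2.length)
    (h : ∀ j, l1.getD j 0 = l2.getD j 0) : l1 = l2 := by
  apply List.ext_getElem hlen
  intro i h1 h2
  have := h i
  rwa [List.getD_eq_getElem l1 0 h1, List.getD_eq_getElem l2 0 h2] at this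

-- A's inner loop (one layer pass), pointwise
theorem pv_innerA (layer : List Int) (n : Nat) :
    ∀ (dm : List Int),
      ((List.range n).foldl
        (fun dm (i : Nat) =>
          if PySem.List.pyGetD dm (i : Int) 0 = 2 then
            dm.set i (PySem.List.pyGetD layer (i : Int) 0) else dm) dm).length = dm.length ∧
      ∀ j, ((List.range n).foldl
        (fun dm (i : Nat) =>
          if PySem.List.pyGetD dm (i : Int) 0 = 2 then
            dm.set i (PySem.List.pyGetD layer (i : Int) 0) else dm) dm).getD j 0
        = if j < n ∧ dm.getD j 0 = 2 then layer.getD j 0 else dm.getD j 0 := by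
  induction n with
  | zero => intro dm; simp
  | succ n ih =>
    intro dm
    obtain ⟨ihlen, ihval⟩ := ih dm
    rw [List.range_succ, List.foldl_append]
    simp only [List.foldl_cons, List.foldl_nil]
    set r := (List.range n).foldl
        (fun dm (i : Nat) =>
          if PySem.List.pyGetD dm (i : Int) 0 = 2 then
            dm.set i (PySem.List.pyGetD layer (i : Int) 0) else dm) dm with hr
    have hrn : r.getD n 0 = dm.getD n 0 := by
      rw [ihval n]; simp
    simp only [PySem.List.pyGetD_natCast]
    by_cases h2 : dm.getD n 0 = 2
    · have hnlt : n < dm.length := by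
        by_contra hge
        rw [List.getD_eq_default _ _ (by omega)] at h2
        exact absurd h2 (by norm_num)
      rw [hrn, if_pos h2]
      refine ⟨by simp [ihlen], fun j => ?_⟩
      rw [pv_getD_set, ihval j]
      by_cases hj : n = j
      · subst hj
        rw [if_pos ⟨rfl, by omega⟩, if_pos ⟨Nat.lt_succ_self _, h2⟩]
      · have : ¬ (n = j ∧ n < r.length) := by tauto
        rw [if_neg this]
        by_cases hjn : j < n
        · simp [hjn, Nat.lt_succ_of_lt hjn]
        · have h1 : ¬ j < n + 1 := by omega
          simp [hjn, h1]
    · rw [hrn, if_neg h2]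
      refine ⟨ihlen, fun j => ?_⟩
      rw [ihval j]
      by_cases hj : j = n
      · subst hj
        rw [if_neg (by simp), if_neg (by tauto)]
      · by_cases hjn : j < n
        · simp [hjn, Nat.lt_succ_of_lt hjn]
        · have h1 : ¬ j < n + 1 := by omega
          simp [hjn, h1]

-- A's outer loop: pointwise fold over the layers
theorem pv_outerA (layers : List (List Int)) :
    ∀ (dm : List Int),
      (layers.foldl
        (fun dm layer =>
          (PySem.List.pyRange 0 (layer.length : Int) 1).foldl
            (fun dm i =>
              if PySem.List.pyGetD dm i 0 = 2 then dm.set i.toNat (PySem.List.pyGetD layer i 0) else dm)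
            dm) dm).length = dm.length ∧
      ∀ j, (layers.foldl
        (fun dm layer =>
          (PySem.List.pyRange 0 (layer.length : Int) 1).foldl
            (fun dm i =>
              if PySem.List.pyGetD dm i 0 = 2 then dm.set i.toNat (PySem.List.pyGetD layer i 0) else dm)
            dm) dm).getD j 0
        = layers.foldl (fun v l => if j < l.length ∧ v = 2 then l.getD j 0 else v) (dm.getD j 0) := by
  induction layers with
  | nil => intro dm; simp
  | cons l ls ih =>
    intro dm
    simp only [List.foldl_cons]
    rw [PySem.List.pyRange_zero_natCast, List.foldl_map]
    have hstep : (fun (dm' : List Int) (i : Nat) =>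
        if PySem.List.pyGetD dm' ((i : Nat) : Int) 0 = 2 then
            dm'.set ((i : Nat) : Int).toNat (PySem.List.pyGetD l ((i : Nat) : Int) 0) else dm')
        = (fun (dm' : List Int) (i : Nat) =>
          if PySem.List.pyGetD dm' ((i : Nat) : Int) 0 = 2 then
            dm'.set i (PySem.List.pyGetD l ((i : Nat) : Int) 0) else dm') := by
      funext dm' i; simp
    rw [hstep]
    obtain ⟨h1len, h1val⟩ := pv_innerA l l.length dm
    obtain ⟨h2len, h2val⟩ := ih ((List.range l.length).foldl
        (fun dm (i : Nat) =>
          if PySem.List.pyGetD dm (i : Int) 0 = 2 then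
            dm.set i (PySem.List.pyGetD l (i : Int) 0) else dm) dm)
    refine ⟨by rw [h2len, h1len], fun j => ?_⟩
    rw [h2val j, h1val j]

-- B's pixel loop, pointwise
theorem pv_loopB (layer_data : List (List Int)) (n : Nat) :
    ∀ (res : List Int),
      ((List.range n).foldl
        (fun res (i : Nat) =>
          if PySem.List.pyGetD res (i : Int) 0 = 2 then
            match pvFirstHit layer_data i with
            | some v => res.set i v
            | none => res
          else res) res).length = res.length ∧
      ∀ j, ((List.range n).foldl
        (fun res (i : Nat) =>
          if PySem.List.pyGetD res (i : Int) 0 = 2 then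
            match pvFirstHit layer_data i with
            | some v => res.set i v
            | none => res
          else res) res).getD j 0
        = if j < n ∧ res.getD j 0 = 2 then (pvFirstHit layer_data j).getD 2 else res.getD j 0 := by
  induction n with
  | zero => intro res; simp
  | succ n ih =>
    intro res
    obtain ⟨ihlen, ihval⟩ := ih res
    rw [List.range_succ, List.foldl_append]
    simp only [List.foldl_cons, List.foldl_nil]
    set r := (List.range n).foldl
        (fun res (i : Nat) =>
          if PySem.List.pyGetD res (i : Int) 0 = 2 then
            match pvFirstHit layer_data i with
            | some v => res.set i v
            | none => res
          else res) res with hr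
    have hrn : r.getD n 0 = res.getD n 0 := by
      rw [ihval n]; simp
    simp only [PySem.List.pyGetD_natCast]
    by_cases h2 : res.getD n 0 = 2
    · have hnlt : n < res.length := by
        by_contra hge
        rw [List.getD_eq_default _ _ (by omega)] at h2
        exact absurd h2 (by norm_num)
      rw [hrn, if_pos h2]
      cases hfh : pvFirstHit layer_data n with
      | some v =>
        refine ⟨by simp [ihlen], fun j => ?_⟩
        rw [pv_getD_set, ihval j]
        by_cases hj : n = j
        · subst hj
          rw [if_pos ⟨rfl, by omega⟩, if_pos ⟨Nat.lt_succ_self _, h2⟩, hfh]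
          rfl
        · have : ¬ (n = j ∧ n < r.length) := by tauto
          rw [if_neg this]
          by_cases hjn : j < n
          · simp [hjn, Nat.lt_succ_of_lt hjn]
          · have h1 : ¬ j < n + 1 := by omega
            simp [hjn, h1]
      | none =>
        refine ⟨ihlen, fun j => ?_⟩
        rw [ihval j]
        by_cases hj : j = n
        · subst hj
          rw [if_neg (by simp), if_pos ⟨Nat.lt_succ_self _, h2⟩, hfh, h2]
          rfl
        · by_cases hjn : j < n
          · simp [hjn, Nat.lt_succ_of_lt hjn]
          · have h1 : ¬ j < n + 1 := by omega
            simp [hjn, h1]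
    · rw [hrn, if_neg h2]
      refine ⟨ihlen, fun j => ?_⟩
      rw [ihval j]
      by_cases hj : j = n
      · subst hj
        rw [if_neg (by simp), if_neg (by tauto)]
      · by_cases hjn : j < n
        · simp [hjn, Nat.lt_succ_of_lt hjn]
        · have h1 : ¬ j < n + 1 := by omega
          simp [hjn, h1]

-- A's pointwise fold keeps a non-2 value
theorem pv_keep (j : Nat) (layers : List (List Int)) (v : Int) (hv : v ≠ 2) :
    layers.foldl (fun v l => if j < l.length ∧ v = 2 then l.getD j 0 else v) v = v := by
  induction layers with
  | nil => rfl
  | cons l ls ih => rw [List.foldl_cons, if_neg (by tauto), ih]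

-- A's pointwise fold from 2 computes the first non-2 hit
theorem pv_first (j : Nat) (layers : List (List Int)) :
    layers.foldl (fun v l => if j < l.length ∧ v = 2 then l.getD j 0 else v) 2
      = (pvFirstHit layers j).getD 2 := by
  induction layers with
  | nil => rfl
  | cons l ls ih =>
    rw [List.foldl_cons]
    by_cases hj : j < l.length
    · have hget : l.getD j 0 = l[j] := List.getD_eq_getElem l 0 hj
      rw [if_pos ⟨hj, rfl⟩, hget]
      by_cases h2 : l[j] = 2
      · rw [h2, ih]
        simp [pvFirstHit, hj, h2]
      · rw [pv_keep j ls l[j] h2]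
        simp [pvFirstHit, hj, h2]
    · rw [if_neg (by tauto), ih]
      simp [pvFirstHit, hj]

-- the two pixel maps agree (the heart of the equivalence)
theorem pv_pixel_map_eq (layer_data : List (List Int)) :
    pvCreatePixelMap layer_data
      = (List.range (layer_data.headD []).length).foldl
          (fun res (i : Nat) =>
            if PySem.List.pyGetD res (i : Int) 0 = 2 then
              match pvFirstHit layer_data i with
              | some v => res.set i v
              | none => res
            else res)
          (layer_data.headD []) := by
  obtain ⟨halen, haval⟩ := pv_outerA layer_data (layer_data.headD [])
  obtain ⟨hblen, hbval⟩ := pv_loopB layer_data (layer_data.headD []).length (layer_data.headD [])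
  unfold pvCreatePixelMap
  apply pv_getD_ext _ _ (halen.trans hblen.symm)
  intro j
  rw [haval j, hbval j]
  by_cases h2 : (layer_data.headD []).getD j 0 = 2
  · have hjlt : j < (layer_data.headD []).length := by
      by_contra hge
      rw [List.getD_eq_default _ _ (by omega)] at h2
      exact absurd h2 (by norm_num)
    rw [h2, pv_first j layer_data, if_pos ⟨hjlt, rfl⟩]
  · rw [pv_keep j layer_data _ h2, if_neg (by tauto)]

-- the row-building loops agree: A's running (start, end) accumulator in closed form
theorem pv_rows (fd : List Int) (w : Int) (k : Nat) :
    ∀ (pd : List (List Int)) (s : Int),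
      (List.range k).foldl
        (fun (st : List (List Int) × Int × Int) (_ : Nat) =>
          (st.1 ++ [PySem.List.slice fd (some st.2.1) (some st.2.2)], st.2.2, st.2.2 + w))
        (pd, s, s + w)
      = (pd ++ (List.range k).map (fun (t : Nat) =>
          PySem.List.slice fd (some (s + t * w)) (some (s + t * w + w))),
         s + k * w, s + k * w + w) := by
  induction k with
  | zero => intro pd s; simp
  | succ k ih =>
    intro pd s
    rw [List.range_succ, List.foldl_append, ih pd s]
    simp only [List.foldl_cons, List.foldl_nil, List.map_append, List.map_cons, List.map_nil,
      List.append_assoc, Prod.mk.injEq]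
    exact ⟨trivial, by push_cast; ring, by push_cast; ring⟩

-- ===== VERDICT (by name: the statement is the Claim_ definition above) =====
theorem format_pixel_data_spec : Claim_equal_format_pixel_data := by
  intro layer_data width height _ _
  unfold Spec_format_pixel_data format_pixel_data format_pixel_data_alt
  rw [pv_pixel_map_eq layer_data]
  by_cases hh : 0 ≤ height
  · obtain ⟨m, rfl⟩ : ∃ m : Nat, height = (m : Int) := ⟨height.toNat, (Int.toNat_of_nonneg hh).symm⟩
    rw [PySem.List.pyRange_zero_natCast m]
    simp only [List.foldl_map, List.map_map]
    have h0 : width = (0 : Int) + width := by ring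
    rw [show ((([] : List (List Int)), (0 : Int), width))
          = ((([] : List (List Int)), (0 : Int), (0 : Int) + width)) by rw [← h0]]
    rw [pv_rows _ width m]
    simp only [List.nil_append]
    apply List.map_congr_left
    intro t _
    simp only [Function.comp_apply, zero_add]
    rw [show ((t : Int) + 1) * width = (t : Int) * width + width from by ring]
  · have hempty : PySem.List.pyRange 0 height 1 = [] := by
      simp [PySem.List.pyRange]; omega
    rw [hempty]; simp
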